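-- pv_equiv track=rewrite | github.com/iniyanr/DSA | practice/floor_of_a_number.py | floor_of_a_number
-- ===== SOURCE A (Python) =====
-- def floor_of_a_number(letters,target):
--     low=0
--     high=len(letters)-1
--     if target<letters[0]:
--         return -1
--     while low<=high:
--         mid=(low+high)//2
--         if letters[mid] == target:
--             return letters[mid]
--         elif letters[mid]>target:
--             high=mid-1
--         else:
--             low=mid+1
--     return letters[low-1]
-- ===== SOURCE B (Python) =====
-- def floor_of_a_number(letters, target):
--     if target < letters[0]:
--         return -1
--
--     def rec(seg, off):
--         if not seg:
--             return letters[off - 1]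
--         m = (len(seg) - 1) // 2
--         v = seg[m]
--         if v == target:
--             return v
--         if v > target:
--             return rec(seg[:m], off)
--         return rec(seg[m + 1:], off + m + 1)
--
--     return rec(letters, 0)
-- ===== Notes on version B (the rewrite author's own statement) =====
-- stated objective: alternative
-- what changed: A's iterative low/high while-loop is replaced by structural recursion on array slices: the helper recurses on seg[:m] or seg[m+1:] with an offset tracking seg's global position, falling back to letters[off-1] on the empty slice.
import Mathlib
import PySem

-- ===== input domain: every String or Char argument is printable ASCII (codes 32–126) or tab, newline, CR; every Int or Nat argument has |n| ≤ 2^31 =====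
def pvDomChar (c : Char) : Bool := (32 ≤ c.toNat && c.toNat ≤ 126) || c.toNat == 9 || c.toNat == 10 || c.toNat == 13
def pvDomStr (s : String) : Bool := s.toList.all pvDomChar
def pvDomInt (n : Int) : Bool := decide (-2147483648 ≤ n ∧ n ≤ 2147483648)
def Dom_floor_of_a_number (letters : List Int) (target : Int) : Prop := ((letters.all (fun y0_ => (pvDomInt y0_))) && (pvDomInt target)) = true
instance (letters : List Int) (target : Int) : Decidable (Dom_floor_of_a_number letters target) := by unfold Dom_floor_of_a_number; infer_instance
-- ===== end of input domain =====

-- B replaces A's low/high while-loop by structural recursion on array slices (seg[:m] / seg[m+1:])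
-- with an offset for the fallback index — an alternative decomposition, same cost up to slice copies.


-- ===== PORT A =====
-- the while-loop of A; indexing uses pyGet? (Python semantics); the `.getD 0` default is never
-- reached on admitted inputs (Python raises IndexError only on the empty list, excluded by Pre_)
def floorLoopA (letters : List Int) (target low high : Int) : Int :=
  if h : low ≤ high then
    let mid := PySem.Int.floordiv (low + high) 2
    let v := (PySem.List.pyGet? letters mid).getD 0
    if v = target then v
    else if v > target then floorLoopA letters target low (mid - 1)
    else floorLoopA letters target (mid + 1) high
  else
    (PySem.List.pyGet? letters (low - 1)).getD 0
termination_by (high + 1 - low).toNat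
decreasing_by
  · have := PySem.Int.floordiv_two_mid_bounds h
    omega
  · have := PySem.Int.floordiv_two_mid_bounds h
    omega

def floor_of_a_number (letters : List Int) (target : Int) : Int :=
  let low : Int := 0
  let high : Int := (letters.length : Int) - 1
  if target < (PySem.List.pyGet? letters 0).getD 0 then -1
  else floorLoopA letters target low high

-- ===== PORT B =====
-- B's helper `rec(seg, off)`: recursion on a shrinking slice of the array, `off` = global index of
-- seg[0]; empty slice ⇒ fallback letters[off-1]
def floorRecB (letters : List Int) (target : Int) (seg : List Int) (off : Int) : Int :=
  if hs : seg = [] then (PySem.List.pyGet? letters (off - 1)).getD 0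
  else
    let m : Nat := (seg.length - 1) / 2
    let v := (PySem.List.pyGet? seg (m : Int)).getD 0
    if v = target then v
    else if v > target then
      floorRecB letters target (PySem.List.slice seg none (some (m : Int))) off
    else
      floorRecB letters target (PySem.List.slice seg (some ((m + 1 : Nat) : Int)) none) (off + (m : Int) + 1)
termination_by seg.length
decreasing_by
  · have h1 : 1 ≤ seg.length := List.length_pos_iff.mpr hs
    rw [PySem.List.slice_to_natCast]
    simp only [List.length_take]
    omega
  · have h1 : 1 ≤ seg.length := List.length_pos_iff.mpr hs
    rw [PySem.List.slice_from_natCast]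
    simp only [List.length_drop]
    omega

def floor_of_a_number_alt (letters : List Int) (target : Int) : Int :=
  if target < (PySem.List.pyGet? letters 0).getD 0 then -1
  else floorRecB letters target letters 0

-- ===== PRECONDITION & SPEC =====
-- Python A evaluates letters[0] and raises IndexError iff the list is empty; nothing else raises.
def Pre_floor_of_a_number (letters : List Int) (target : Int) : Prop := letters ≠ []
instance (letters : List Int) (target : Int) : Decidable (Pre_floor_of_a_number letters target) := by unfold Pre_floor_of_a_number; infer_instance
def pvWitness_floor_of_a_number : List Int × Int := ([1, 3, 5], 4)
def Spec_floor_of_a_number (letters : List Int) (target : Int) (out : Int) : Prop := out = floor_of_a_number_alt letters target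
instance (letters : List Int) (target : Int) (out : Int) : Decidable (Spec_floor_of_a_number letters target out) := by unfold Spec_floor_of_a_number; infer_instance

-- ===== CLAIM (what is proved, stated in full; the proofs are below) =====
def Claim_equal_floor_of_a_number : Prop := ∀ (letters : List Int) (target : Int), Dom_floor_of_a_number letters target → Pre_floor_of_a_number letters target → Spec_floor_of_a_number letters target (floor_of_a_number letters target)

-- ===== LEMMAS AND PROOFS =====

-- Correspondence: B on the slice letters[low:high+1] with offset low computes A's loop on (low, high).
theorem recB_eq_loopA (letters : List Int) (target : Int) :
    ∀ n (low high : Int), 0 ≤ low → low ≤ high + 1 → high < (letters.length : Int) →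
      (high + 1 - low).toNat ≤ n →
      floorRecB letters target ((letters.drop low.toNat).take (high + 1 - low).toNat) low
        = floorLoopA letters target low high := by
  intro n
  induction n with
  | zero =>
    intro low high h0 hle hhi hn
    have hW : (high + 1 - low).toNat = 0 := by omega
    have hgt : ¬ low ≤ high := by omega
    rw [hW, floorRecB, floorLoopA]
    simp [hgt]
  | succ n ih =>
    intro low high h0 hle hhi hn
    by_cases hlh : low ≤ high
    · set W := (high + 1 - low).toNat with hWdef
      set L := low.toNat with hLdef
      have hW1 : 1 ≤ W := by omega
      have hWlen : W ≤ letters.length - L := by omega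
      have hseg_len : ((letters.drop L).take W).length = W := by
        simp only [List.length_take, List.length_drop]
        omega
      have hne : (letters.drop L).take W ≠ [] := by
        intro h
        rw [h] at hseg_len
        simp at hseg_len
        omega
      set m : Nat := (W - 1) / 2 with hmdef
      have hmW : m < W := by omega
      have hmid : PySem.Int.floordiv (low + high) 2 = ((L + m : Nat) : Int) := by
        rw [PySem.Int.floordiv_eq_ediv_of_pos (by omega)]
        push_cast
        omega
      have hv : (PySem.List.pyGet? ((letters.drop L).take W) (m : Int)).getD 0
              = (PySem.List.pyGet? letters (PySem.Int.floordiv (low + high) 2)).getD 0 := by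
        rw [hmid]
        simp only [PySem.List.pyGet?_natCast]
        simp [hmW, List.getElem?_drop]
      rw [floorRecB, floorLoopA, dif_neg hne, dif_pos hlh]
      simp only [hseg_len, ← hmdef, hv]
      set mid := PySem.Int.floordiv (low + high) 2 with hmiddef
      have hmidv : mid = (L : Int) + (m : Int) := by rw [hmid]; push_cast; ring
      have hL : (L : Int) = low := by omega
      set v := (PySem.List.pyGet? letters mid).getD 0 with hvdef
      by_cases h1 : v = target
      · simp [h1]
      · by_cases h2 : v > target
        · simp only [h1, if_false, h2, if_true]
          rw [PySem.List.slice_to_natCast]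
          have h3 : min m W = (mid - 1 + 1 - low).toNat := by omega
          rw [List.take_take, h3]
          exact ih low (mid - 1) h0 (by omega) (by omega) (by omega)
        · simp only [h1, if_false, h2, if_false]
          rw [PySem.List.slice_from_natCast]
          have hoff : low + (m : Int) + 1 = mid + 1 := by omega
          have h4 : L + (m + 1) = (mid + 1).toNat := by omega
          have h5 : W - (m + 1) = (high + 1 - (mid + 1)).toNat := by omega
          rw [List.drop_take, List.drop_drop, h4, h5, hoff]
          exact ih (mid + 1) high (by omega) (by omega) (by omega) (by omega)
    · have hW : (high + 1 - low).toNat = 0 := by omega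
      rw [hW, floorRecB, floorLoopA]
      simp [hlh]

-- ===== VERDICT (by name: the statement is the Claim_ definition above) =====
theorem floor_of_a_number_spec : Claim_equal_floor_of_a_number := by
  intro letters target _ hpre
  unfold Spec_floor_of_a_number floor_of_a_number floor_of_a_number_alt
  by_cases hlt : target < (PySem.List.pyGet? letters 0).getD 0
  · simp [hlt]
  · simp only [hlt, if_false]
    have hlen : 1 ≤ letters.length := List.length_pos_iff.mpr hpre
    have h := recB_eq_loopA letters target letters.length 0 ((letters.length : Int) - 1)
      (by omega) (by omega) (by omega) (by omega)
    have hseg : ((letters.drop (0 : Int).toNat).take ((letters.length : Int) - 1 + 1 - 0).toNat) = letters := by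
      simp
    rw [hseg] at h
    exact h.symm
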